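-- pv_equiv track=rewrite | github.com/AEPForGTE/ILLOD | Syntactic_Classifiers.py | stop_words_handling
-- ===== SOURCE A (Python) =====
-- def stop_words_handling(term):
--     splitted_term = term.split()
--     stop_words = set(["for", "and", "of", "in", "via", "be"])
--     if splitted_term[0] in stop_words:
--         stop_words = stop_words - set([splitted_term[0]])
--     for sw in stop_words:
--         while sw in splitted_term:
--             splitted_term.remove(sw)
--     sanitized_term = " ".join([w for w in splitted_term])
--     return sanitized_term
-- ===== SOURCE B (Python) =====
-- def stop_words_handling(term):
--     words = term.split()
--     removal = {"for", "and", "of", "in", "via", "be"} - {words[0]}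
--     return " ".join(w for w in words if w not in removal)
-- ===== Notes on version B (the rewrite author's own statement) =====
-- stated objective: simpler
-- what changed: Replaces A's nested passes (outer loop over each stop word with an inner while-remove that rescans and mutates the word list) by building the effective removal set once (stop words minus the first word) and doing a single filtering pass over the words.
import Mathlib
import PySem

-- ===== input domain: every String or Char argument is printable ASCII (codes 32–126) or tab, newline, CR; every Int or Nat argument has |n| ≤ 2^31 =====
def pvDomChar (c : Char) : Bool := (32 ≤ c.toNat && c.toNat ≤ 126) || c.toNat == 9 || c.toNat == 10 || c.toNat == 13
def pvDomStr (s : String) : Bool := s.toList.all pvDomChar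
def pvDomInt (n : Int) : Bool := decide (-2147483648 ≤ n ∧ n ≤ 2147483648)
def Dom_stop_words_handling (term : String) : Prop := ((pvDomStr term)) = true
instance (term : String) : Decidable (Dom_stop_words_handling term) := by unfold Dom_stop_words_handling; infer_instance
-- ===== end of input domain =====

-- B replaces A's nested remove loops by one filtering pass over a prebuilt removal set (simpler; equivalence of RETURN values).

-- ===== PORT A =====
-- 'while sw in splitted_term: splitted_term.remove(sw)'  (list.remove removes the FIRST occurrence = List.erase)
def pvWhileRemove (sw : String) (lst : List String) : List String :=
  if _hm : sw ∈ lst then pvWhileRemove sw (lst.erase sw) else lst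
termination_by lst.length
decreasing_by
  have := List.length_erase_of_mem _hm
  have := List.length_pos_of_mem _hm
  omega

def stop_words_handling (term : String) : String :=
  let splitted := PySem.Str.split₀ term
  let stop_words : PySem.Set String :=
    PySem.Set.ofList ["for", "and", "of", "in", "via", "be"]
  -- splitted_term[0]: Pre_ guarantees splitted ≠ [] (Python raises IndexError otherwise)
  let first := splitted.headD ""
  let stop_words :=
    if PySem.Set.contains stop_words first then
      PySem.Set.diff stop_words (PySem.Set.ofList [first])
    else stop_words
  -- for sw in stop_words: while sw in splitted_term: splitted_term.remove(sw)
  -- (the final list is independent of the set's iteration order, which Python leaves to the hash)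
  let splitted := stop_words.foldl (fun l sw => pvWhileRemove sw l) splitted
  PySem.Str.join " " splitted

-- ===== PORT B =====
def stop_words_handling_alt (term : String) : String :=
  let words := PySem.Str.split₀ term
  let removal : PySem.Set String :=
    PySem.Set.diff (PySem.Set.ofList ["for", "and", "of", "in", "via", "be"])
      (PySem.Set.ofList [words.headD ""])
  PySem.Str.join " " (words.filter (fun w => !(PySem.Set.contains removal w)))

-- ===== PRECONDITION & SPEC =====
-- Pre_ excludes exactly the inputs with no words (empty/whitespace-only term), where A raises IndexError on splitted_term[0].
def Pre_stop_words_handling (term : String) : Prop := PySem.Str.split₀ term ≠ []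
instance (term : String) : Decidable (Pre_stop_words_handling term) := by
  unfold Pre_stop_words_handling; infer_instance
def pvWitness_stop_words_handling : String := "for the win"
def Spec_stop_words_handling (term : String) (out : String) : Prop := out = stop_words_handling_alt term
instance (term : String) (out : String) : Decidable (Spec_stop_words_handling term out) := by unfold Spec_stop_words_handling; infer_instance

-- ===== CLAIM (what is proved, stated in full; the proofs are below) =====
def Claim_equal_stop_words_handling : Prop := ∀ (term : String), Dom_stop_words_handling term → Pre_stop_words_handling term → Spec_stop_words_handling term (stop_words_handling term)

-- ===== LEMMAS AND PROOFS =====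

theorem filter_erase_of_false {p : String → Bool} {sw : String} (hp : p sw = false) :
    ∀ (l : List String), (l.erase sw).filter p = l.filter p := by
  intro l
  induction l with
  | nil => rfl
  | cons x xs ih =>
    by_cases hx : x = sw
    · subst hx
      simp [hp]
    · have hb : (x == sw) = false := by simp [hx]
      simp only [List.erase_cons, hb]
      simp [List.filter_cons, ih]

theorem pvWhileRemove_eq_filter (sw : String) (l : List String) :
    pvWhileRemove sw l = l.filter (fun w => !(w == sw)) := by
  induction hn : l.length using Nat.strong_induction_on generalizing l with
  | _ n ih =>
    unfold pvWhileRemove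
    by_cases hm : sw ∈ l
    · rw [dif_pos hm]
      have hlen := List.length_erase_of_mem hm
      have hpos := List.length_pos_of_mem hm
      rw [ih (l.erase sw).length (by omega) (l.erase sw) rfl,
        filter_erase_of_false (by simp) l]
    · rw [dif_neg hm]
      refine (List.filter_eq_self.2 ?_).symm
      intro w hw
      simp only [Bool.not_eq_eq_eq_not, Bool.not_true, beq_eq_false_iff_ne, ne_eq]
      rintro rfl; exact hm hw

theorem foldl_whileRemove_eq_filter (S : List String) :
    ∀ (l : List String),
      S.foldl (fun l sw => pvWhileRemove sw l) l = l.filter (fun w => !(S.contains w)) := by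
  induction S with
  | nil =>
    intro l
    simp only [List.foldl_nil]
    exact (List.filter_eq_self.2 (fun a _ => rfl)).symm
  | cons s S ih =>
    intro l
    simp only [List.foldl_cons]
    rw [ih, pvWhileRemove_eq_filter, List.filter_filter]
    apply List.filter_congr
    intro w _
    by_cases h : w = s <;> simp [h, Bool.and_comm]

theorem contains_branch_eq (base : PySem.Set String) (first w : String) :
    List.contains
      (if List.contains base first = true then
        PySem.Set.diff base (PySem.Set.ofList [first]) else base) w
    = List.contains (PySem.Set.diff base (PySem.Set.ofList [first])) w := by
  by_cases hb : List.contains base first = true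
  · rw [if_pos hb]
  · rw [if_neg hb]
    have hf : first ∉ base := fun hmem => hb (List.contains_iff_mem.2 hmem)
    rw [Bool.eq_iff_iff]
    simp only [List.contains_iff_mem]
    rw [PySem.Set.mem_diff]
    constructor
    · intro hw
      refine ⟨hw, ?_⟩
      rw [PySem.Set.mem_ofList]
      intro hm
      simp only [List.mem_singleton] at hm
      exact hf (hm ▸ hw)
    · exact fun h => h.1

-- ===== VERDICT (by name: the statement is the Claim_ definition above) =====
theorem stop_words_handling_spec : Claim_equal_stop_words_handling := by
  intro term _ _
  show stop_words_handling term = stop_words_handling_alt term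
  unfold stop_words_handling stop_words_handling_alt
  simp only [foldl_whileRemove_eq_filter, PySem.Set.contains_eq_listContains]
  congr 1
  apply List.filter_congr
  intro w _
  exact congrArg (fun b => !b)
    (contains_branch_eq (PySem.Set.ofList ["for", "and", "of", "in", "via", "be"])
      ((PySem.Str.split₀ term).headD "") w)
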